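-- pv_equiv track=rewrite | github.com/YundaeLeeSong/ydjs-coding-javalin | _ap_quiz_03.py | countYZ
-- ===== SOURCE A (Python) =====
-- def countYZ(s: str) -> int:
--     """
--     Description:
--         Given a string, count the number of words ending in 'y' or 'z'.
--         The character must appear at the end of a word — that is, it must not be
--         immediately followed by another alphabetic letter. The comparison is
--         case-insensitive.
--
--     Examples:
--         countYZ("fez day") -> 2
--         countYZ("day fez") -> 2
--         countYZ("day fyyyz") -> 2
--
--     Args:
--         s (str): The input string.
--
--     Returns:
--         int: The number of words ending in 'y' or 'z'.
--     """
--     ### [Your Implementation Here]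
--
--     # Case-1. If the question can be solved with 'iteration (for/while)',
--     # design the most efficient algorithm.
--     i = 0
--     count = 0
--     s = s.lower()
--     while i < len(s):
--         if i == len(s) - 1:
--             if s[i] == "y" or s[i] == "z":
--                 count += 1
--             break
--         if not s[i + 1].isalpha():
--             if s[i] == "y" or s[i] == "z":
--                 count += 1
--         i += 1
--     return count
-- ===== SOURCE B (Python) =====
-- def countYZ(s: str) -> int:
--     count = 0
--     last = ''
--     for c in s.lower():
--         if c.isalpha():
--             last = c
--         else:
--             if last in ('y', 'z'):
--                 count += 1
--             last = ''
--     if last in ('y', 'z'):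
--         count += 1
--     return count
-- ===== Notes on version B (the rewrite author's own statement) =====
-- stated objective: idiomatic
-- what changed: Replaces A's index-based while loop that peeks at s[i+1] (per-step indexing and len() calls) with a single for-each fold carrying the last alphabetic character of the current run, flushed at each word break and once at the end.
import Mathlib
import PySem

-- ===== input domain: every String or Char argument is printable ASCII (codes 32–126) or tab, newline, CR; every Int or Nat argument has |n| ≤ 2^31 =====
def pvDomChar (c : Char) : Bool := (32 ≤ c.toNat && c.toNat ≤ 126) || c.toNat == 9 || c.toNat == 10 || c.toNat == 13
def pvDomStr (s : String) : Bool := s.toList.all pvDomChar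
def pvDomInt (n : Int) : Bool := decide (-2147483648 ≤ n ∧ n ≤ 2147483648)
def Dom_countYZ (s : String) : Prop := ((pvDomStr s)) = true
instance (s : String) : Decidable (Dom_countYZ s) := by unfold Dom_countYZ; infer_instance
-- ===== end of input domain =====

-- B replaces A's index-with-lookahead while loop by a single fold that carries the last
-- alphabetic character of the current run and flushes it at word breaks (objective: idiomatic).

-- ===== PORT A =====
-- A's while loop over indices; i is in range wherever the loop reads s[i]/s[i+1], so getD is exact.
def countYZLoopA (cs : List Char) (i : Nat) (count : Int) : Int :=
  if i < cs.length then
    if i = cs.length - 1 then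
      if cs.getD i ' ' = 'y' ∨ cs.getD i ' ' = 'z' then count + 1 else count
    else
      countYZLoopA cs (i + 1)
        (if ¬ (PySem.Chars.isalpha (cs.getD (i + 1) ' ') = true) then
           (if cs.getD i ' ' = 'y' ∨ cs.getD i ' ' = 'z' then count + 1 else count)
         else count)
  else count
termination_by cs.length - i

def countYZ (s : String) : Int :=
  countYZLoopA (PySem.Chars.lower s.toList) 0 0

-- ===== PORT B =====
-- last = '' is ported as none, last = c as some c.
def pvYZLast (last : Option Char) : Bool :=
  match last with
  | some c => c = 'y' || c = 'z'
  | none => false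

def pvStepB (st : Int × Option Char) (c : Char) : Int × Option Char :=
  if PySem.Chars.isalpha c then (st.1, some c)
  else ((if pvYZLast st.2 then st.1 + 1 else st.1), none)

def countYZ_alt (s : String) : Int :=
  let st := (PySem.Chars.lower s.toList).foldl pvStepB (0, none)
  if pvYZLast st.2 then st.1 + 1 else st.1

-- ===== PRECONDITION & SPEC =====
def Spec_countYZ (s : String) (out : Int) : Prop := out = countYZ_alt s
instance (s : String) (out : Int) : Decidable (Spec_countYZ s out) := by unfold Spec_countYZ; infer_instance

-- ===== CLAIM (what is proved, stated in full; the proofs are below) =====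
def Claim_equal_countYZ : Prop := ∀ (s : String), Dom_countYZ s → Spec_countYZ s (countYZ s)

-- ===== LEMMAS AND PROOFS =====

-- Common characterisation: number of positions holding 'y'/'z' whose successor is absent or non-alphabetic.
def pvCnt : List Char → Int
  | [] => 0
  | [c] => if c = 'y' ∨ c = 'z' then 1 else 0
  | c :: d :: rest =>
      (if ¬ (PySem.Chars.isalpha d = true) ∧ (c = 'y' ∨ c = 'z') then 1 else 0) + pvCnt (d :: rest)

-- pending contribution of B's carried state at the head of the remaining input
def pvHeadNonAlpha : List Char → Bool
  | [] => true
  | c :: _ => ! PySem.Chars.isalpha c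

def pvBonus (last : Option Char) (cs : List Char) : Int :=
  if pvYZLast last && pvHeadNonAlpha cs then 1 else 0

lemma yz_isalpha {c : Char} (h : c = 'y' ∨ c = 'z') : PySem.Chars.isalpha c = true := by
  rcases h with h | h <;> subst h <;> decide

lemma loopA_eq (cs : List Char) : ∀ i count, countYZLoopA cs i count = count + pvCnt (cs.drop i) := by
  intro i
  induction' hk : cs.length - i using Nat.strong_induction_on with k ih generalizing i
  intro count
  rw [countYZLoopA]
  by_cases h : i < cs.length
  · have hdrop : cs.drop i = cs[i] :: cs.drop (i + 1) := List.drop_eq_getElem_cons h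
    have hget : cs.getD i ' ' = cs[i] := List.getD_eq_getElem cs ' ' h
    by_cases hlast : i = cs.length - 1
    · have hnil : cs.drop (i + 1) = [] := List.drop_eq_nil_of_le (by omega)
      rw [if_pos h, if_pos hlast, hget, hdrop, hnil]
      simp only [pvCnt]
      split_ifs <;> ring
    · have h2 : i + 1 < cs.length := by omega
      have hdrop2 : cs.drop (i + 1) = cs[i+1] :: cs.drop (i + 2) := List.drop_eq_getElem_cons h2
      have hget2 : cs.getD (i+1) ' ' = cs[i+1] := List.getD_eq_getElem cs ' ' h2
      rw [if_pos h, if_neg hlast, hget, hget2]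
      rw [ih (cs.length - (i+1)) (by omega) (i+1) rfl]
      rw [hdrop, hdrop2]
      simp only [pvCnt]
      rw [← hdrop2]
      split_ifs <;> try ring
      all_goals tauto
  · have hnil : cs.drop i = [] := List.drop_eq_nil_of_le (by omega)
    rw [if_neg h, hnil]
    simp [pvCnt]

lemma foldB_eq (cs : List Char) : ∀ (count : Int) (last : Option Char),
    (if pvYZLast (cs.foldl pvStepB (count, last)).2 then (cs.foldl pvStepB (count, last)).1 + 1
     else (cs.foldl pvStepB (count, last)).1)
      = count + pvBonus last cs + pvCnt cs := by
  induction cs with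
  | nil =>
    intro count last
    simp only [List.foldl_nil, pvCnt, pvBonus, pvHeadNonAlpha, Bool.and_true]
    split_ifs <;> ring
  | cons c rest ih =>
    intro count last
    rw [List.foldl_cons]
    by_cases ha : PySem.Chars.isalpha c = true
    · rw [show pvStepB (count, last) c = (count, some c) by simp [pvStepB, ha]]
      rw [ih count (some c)]
      have hb : pvBonus last (c :: rest) = 0 := by
        simp [pvBonus, pvHeadNonAlpha, ha]
      rw [hb]
      cases rest with
      | nil =>
        simp only [pvBonus, pvCnt, pvYZLast, pvHeadNonAlpha, Bool.and_true]
        split_ifs <;> simp_all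
      | cons d rest' =>
        simp only [pvCnt, pvBonus, pvYZLast, pvHeadNonAlpha]
        split_ifs <;> (simp_all; try omega)
    · rw [show pvStepB (count, last) c
            = ((if pvYZLast last then count + 1 else count), none) by simp [pvStepB, ha]]
      rw [ih _ none]
      have hyz : ¬ (c = 'y' ∨ c = 'z') := fun h => ha (yz_isalpha h)
      have hcnt : pvCnt (c :: rest) = pvCnt rest := by
        cases rest with
        | nil => simp [pvCnt, hyz]
        | cons d rest' => simp [pvCnt, hyz]
      rw [hcnt]
      simp only [pvBonus, pvHeadNonAlpha, ha, Bool.not_false, Bool.and_true]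
      split_ifs <;> simp_all [pvYZLast]

-- ===== VERDICT (by name: the statement is the Claim_ definition above) =====
theorem countYZ_spec : Claim_equal_countYZ := by
  intro s _
  show countYZ s = countYZ_alt s
  rw [countYZ, countYZ_alt, loopA_eq]
  have := foldB_eq (PySem.Chars.lower s.toList) 0 none
  simp only [List.drop_zero]
  rw [this]
  simp [pvBonus, pvYZLast]
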